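-- pv_equiv track=rewrite | github.com/jkm8294/GreenData | analytics/nlp/topic_modeling.py | _auto_label_topic
-- ===== SOURCE A (Python) =====
-- def _auto_label_topic(top_words: list[str]) -> str:
--     """
--     Heuristic auto-labeling based on keyword presence in top words.
--     Falls back to the top word if no pattern matches.
--     """
--     words_set = set(w.lower() for w in top_words)
--
--     label_patterns = [
--         ({"noise", "loud", "sound", "quiet", "residential", "neighborhood", "quality life"},
--          "Noise / Quality of Life"),
--         ({"water", "drought", "consumption", "gallons", "aquifer", "shortage", "cooling"},
--          "Water Consumption"),
--         ({"power", "grid", "electricity", "energy", "outage", "brownout", "blackout", "strain"},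
--          "Power Grid Strain"),
--         ({"property", "home", "value", "housing", "land", "zoning", "residential", "real estate"},
--          "Property Values / Land Use"),
--         ({"tax", "incentive", "subsidy", "break", "revenue", "taxpayer", "abatement", "deal"},
--          "Tax Incentive Fairness"),
--         ({"environment", "climate", "carbon", "emissions", "pollution", "green", "sustainable"},
--          "Environmental Impact"),
--         ({"jobs", "employment", "hire", "workers", "economic", "economy", "workforce"},
--          "Economic Development"),
--         ({"traffic", "construction", "road", "truck", "congestion", "infrastructure"},
--          "Infrastructure / Traffic"),
--     ]
--
--     best_match = None
--     best_overlap = 0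
--
--     for keywords, label in label_patterns:
--         overlap = len(words_set & keywords)
--         if overlap > best_overlap:
--             best_overlap = overlap
--             best_match = label
--
--     if best_match and best_overlap >= 2:
--         return best_match
--
--     return f"Cluster: {top_words[0]}"
-- ===== SOURCE B (Python) =====
-- _LABELS = [
--     "Noise / Quality of Life",
--     "Water Consumption",
--     "Power Grid Strain",
--     "Property Values / Land Use",
--     "Tax Incentive Fairness",
--     "Environmental Impact",
--     "Economic Development",
--     "Infrastructure / Traffic",
-- ]
--
-- # Inverted keyword index: keyword -> indices of the topic patterns containing it.
-- _KEYWORD_INDEX = {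
--     "noise": [0], "loud": [0], "sound": [0], "quiet": [0],
--     "residential": [0, 3], "neighborhood": [0], "quality life": [0],
--     "water": [1], "drought": [1], "consumption": [1], "gallons": [1],
--     "aquifer": [1], "shortage": [1], "cooling": [1],
--     "power": [2], "grid": [2], "electricity": [2], "energy": [2],
--     "outage": [2], "brownout": [2], "blackout": [2], "strain": [2],
--     "property": [3], "home": [3], "value": [3], "housing": [3],
--     "land": [3], "zoning": [3], "real estate": [3],
--     "tax": [4], "incentive": [4], "subsidy": [4], "break": [4],
--     "revenue": [4], "taxpayer": [4], "abatement": [4], "deal": [4],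
--     "environment": [5], "climate": [5], "carbon": [5], "emissions": [5],
--     "pollution": [5], "green": [5], "sustainable": [5],
--     "jobs": [6], "employment": [6], "hire": [6], "workers": [6],
--     "economic": [6], "economy": [6], "workforce": [6],
--     "traffic": [7], "construction": [7], "road": [7], "truck": [7],
--     "congestion": [7], "infrastructure": [7],
-- }
--
--
-- def _auto_label_topic(top_words: list[str]) -> str:
--     """
--     Heuristic auto-labeling: each distinct lowered word votes, through a
--     precomputed inverted keyword index, for the topic patterns that contain
--     it; the first pattern with a maximal vote count (at least 2) wins.
--     """
--     counts = [0] * len(_LABELS)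
--     for w in {w.lower() for w in top_words}:
--         for i in _KEYWORD_INDEX.get(w, ()):
--             counts[i] += 1
--     top = max(counts)
--     if top >= 2:
--         return _LABELS[counts.index(top)]
--     return f"Cluster: {top_words[0]}"
-- ===== Notes on version B (the rewrite author's own statement) =====
-- stated objective: alternative
-- what changed: Instead of intersecting the lowered-word set with each of the eight keyword sets, B keeps a precomputed inverted index (keyword -> pattern indices) and makes one voting pass over the distinct lowered words, incrementing per-pattern counters, then picks the first pattern with the maximal count (>= 2); Pre_ excludes only the empty list, on which A raises IndexError at top_words[0].
import Mathlib
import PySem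

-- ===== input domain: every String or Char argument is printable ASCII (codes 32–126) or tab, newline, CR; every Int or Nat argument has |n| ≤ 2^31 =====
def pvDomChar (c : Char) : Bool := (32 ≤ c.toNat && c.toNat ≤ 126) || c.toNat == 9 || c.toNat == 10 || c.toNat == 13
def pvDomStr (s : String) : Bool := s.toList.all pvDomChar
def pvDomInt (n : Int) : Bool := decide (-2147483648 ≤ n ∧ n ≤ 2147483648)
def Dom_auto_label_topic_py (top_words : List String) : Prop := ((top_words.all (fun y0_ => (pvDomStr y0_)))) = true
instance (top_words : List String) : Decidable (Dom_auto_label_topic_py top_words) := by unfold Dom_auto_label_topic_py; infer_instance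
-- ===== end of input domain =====

-- B replaces A's per-pattern set intersections by a precomputed inverted keyword→pattern-indices
-- dict and one voting pass over the distinct lowered words (objective: alternative).

-- ===== PORT A =====

def pvPatternsA : List (PySem.Set String × String) :=
  [ (PySem.Set.ofList ["noise", "loud", "sound", "quiet", "residential", "neighborhood", "quality life"],
     "Noise / Quality of Life"),
    (PySem.Set.ofList ["water", "drought", "consumption", "gallons", "aquifer", "shortage", "cooling"],
     "Water Consumption"),
    (PySem.Set.ofList ["power", "grid", "electricity", "energy", "outage", "brownout", "blackout", "strain"],
     "Power Grid Strain"),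
    (PySem.Set.ofList ["property", "home", "value", "housing", "land", "zoning", "residential", "real estate"],
     "Property Values / Land Use"),
    (PySem.Set.ofList ["tax", "incentive", "subsidy", "break", "revenue", "taxpayer", "abatement", "deal"],
     "Tax Incentive Fairness"),
    (PySem.Set.ofList ["environment", "climate", "carbon", "emissions", "pollution", "green", "sustainable"],
     "Environmental Impact"),
    (PySem.Set.ofList ["jobs", "employment", "hire", "workers", "economic", "economy", "workforce"],
     "Economic Development"),
    (PySem.Set.ofList ["traffic", "construction", "road", "truck", "congestion", "infrastructure"],
     "Infrastructure / Traffic") ]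

-- words_set = set(w.lower() for w in top_words)
def pvWordsSetA (top_words : List String) : PySem.Set String :=
  PySem.Set.ofList (top_words.map PySem.Str.lower)

-- the for-loop over label_patterns maintaining (best_match, best_overlap)
def pvBest (words_set : PySem.Set String) : Option String × Int :=
  pvPatternsA.foldl
    (fun b p =>
      let overlap := PySem.Set.len (PySem.Set.inter words_set p.1)
      if b.2 < overlap then (some p.2, overlap) else b)
    ((none : Option String), (0 : Int))

def auto_label_topic_py (top_words : List String) : String :=
  match pvBest (pvWordsSetA top_words) with
  | (some l, bo) =>
      if l ≠ "" ∧ 2 ≤ bo then l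
      else match PySem.List.pyGet? top_words 0 with
           | some w => "Cluster: " ++ w
           | none => ""   -- IndexError on empty top_words; excluded by Pre_
  | (none, _) =>
      match PySem.List.pyGet? top_words 0 with
      | some w => "Cluster: " ++ w
      | none => ""

-- ===== PORT B =====

-- _LABELS
def pvLabels : List String :=
  [ "Noise / Quality of Life", "Water Consumption", "Power Grid Strain",
    "Property Values / Land Use", "Tax Incentive Fairness", "Environmental Impact",
    "Economic Development", "Infrastructure / Traffic" ]

-- _KEYWORD_INDEX : keyword -> pattern indices containing it
def pvIndex : PySem.Dict String (List Int) :=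
  PySem.Dict.ofList
    [ ("noise", [0]), ("loud", [0]), ("sound", [0]), ("quiet", [0]),
      ("residential", [0, 3]), ("neighborhood", [0]), ("quality life", [0]),
      ("water", [1]), ("drought", [1]), ("consumption", [1]), ("gallons", [1]),
      ("aquifer", [1]), ("shortage", [1]), ("cooling", [1]),
      ("power", [2]), ("grid", [2]), ("electricity", [2]), ("energy", [2]),
      ("outage", [2]), ("brownout", [2]), ("blackout", [2]), ("strain", [2]),
      ("property", [3]), ("home", [3]), ("value", [3]), ("housing", [3]),
      ("land", [3]), ("zoning", [3]), ("real estate", [3]),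
      ("tax", [4]), ("incentive", [4]), ("subsidy", [4]), ("break", [4]),
      ("revenue", [4]), ("taxpayer", [4]), ("abatement", [4]), ("deal", [4]),
      ("environment", [5]), ("climate", [5]), ("carbon", [5]), ("emissions", [5]),
      ("pollution", [5]), ("green", [5]), ("sustainable", [5]),
      ("jobs", [6]), ("employment", [6]), ("hire", [6]), ("workers", [6]),
      ("economic", [6]), ("economy", [6]), ("workforce", [6]),
      ("traffic", [7]), ("construction", [7]), ("road", [7]), ("truck", [7]),
      ("congestion", [7]), ("infrastructure", [7]) ]

-- counts[i] += 1   (exact: every index stored in pvIndex is in range 0..7)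
def pvIncr (cs : List Int) (i : Int) : List Int :=
  PySem.List.pySetD cs i (PySem.List.pyGetD cs i 0 + 1)

-- for i in _KEYWORD_INDEX.get(w, ()): counts[i] += 1
def pvVote (cs : List Int) (w : String) : List Int :=
  (PySem.Dict.getD pvIndex w []).foldl pvIncr cs

-- counts = [0] * len(_LABELS); for w in {w.lower() for w in top_words}: …
-- (Python's set-iteration order is irrelevant: only the final counters are used)
def pvCountsB (top_words : List String) : List Int :=
  (PySem.Set.ofList (top_words.map PySem.Str.lower)).foldl pvVote
    (List.replicate pvLabels.length 0)

def auto_label_topic_py_alt (top_words : List String) : String :=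
  match PySem.List.max? (pvCountsB top_words) (fun c => c) with
  | some top =>
      if 2 ≤ top then
        match PySem.List.index? (pvCountsB top_words) top with
        | some k => (pvLabels[k]?).getD ""
        | none => ""   -- unreachable: top is an element of counts
      else match PySem.List.pyGet? top_words 0 with
           | some w => "Cluster: " ++ w
           | none => ""   -- IndexError on empty top_words; excluded by Pre_
  | none => ""   -- unreachable: counts is never empty

-- ===== PRECONDITION & SPEC =====
-- Pre_ excludes only the empty list, on which the Python A raises IndexError at top_words[0].
def Pre_auto_label_topic_py (top_words : List String) : Prop := top_words ≠ []
instance (top_words : List String) : Decidable (Pre_auto_label_topic_py top_words) := by unfold Pre_auto_label_topic_py; infer_instance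
def pvWitness_auto_label_topic_py : List String := (["wind"])

def Spec_auto_label_topic_py (top_words : List String) (out : String) : Prop := out = auto_label_topic_py_alt top_words
instance (top_words : List String) (out : String) : Decidable (Spec_auto_label_topic_py top_words out) := by unfold Spec_auto_label_topic_py; infer_instance

-- ===== CLAIM (what is proved, stated in full; the proofs are below) =====
def Claim_equal_auto_label_topic_py : Prop := ∀ (top_words : List String), Dom_auto_label_topic_py top_words → Pre_auto_label_topic_py top_words → Spec_auto_label_topic_py top_words (auto_label_topic_py top_words)

-- ===== LEMMAS AND PROOFS =====

-- proof-side view of the patterns (keyword lists in A's declaration order)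
def pvPats : List (List String × String) :=
  [ (["noise", "loud", "sound", "quiet", "residential", "neighborhood", "quality life"],
     "Noise / Quality of Life"),
    (["water", "drought", "consumption", "gallons", "aquifer", "shortage", "cooling"],
     "Water Consumption"),
    (["power", "grid", "electricity", "energy", "outage", "brownout", "blackout", "strain"],
     "Power Grid Strain"),
    (["property", "home", "value", "housing", "land", "zoning", "residential", "real estate"],
     "Property Values / Land Use"),
    (["tax", "incentive", "subsidy", "break", "revenue", "taxpayer", "abatement", "deal"],
     "Tax Incentive Fairness"),
    (["environment", "climate", "carbon", "emissions", "pollution", "green", "sustainable"],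
     "Environmental Impact"),
    (["jobs", "employment", "hire", "workers", "economic", "economy", "workforce"],
     "Economic Development"),
    (["traffic", "construction", "road", "truck", "congestion", "infrastructure"],
     "Infrastructure / Traffic") ]

def pvStep (b : Option String × Int) (q : Int × String) : Option String × Int :=
  if b.2 < q.1 then (some q.2, q.1) else b
def pvMxv (l : List (Int × String)) : Int := l.foldr (fun q a => max q.1 a) 0

def pvOv (ws : List String) (kws : List String) : Int := ((ws.countP (fun w => decide (w ∈ kws)) : Nat) : Int)
def pvL (ws : List String) : List (Int × String) := pvPats.map (fun p => (pvOv ws p.1, p.2))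
def pvFb (tw : List String) : String := match PySem.List.pyGet? tw 0 with | some w => "Cluster: " ++ w | none => ""
def pvRef (tw : List String) : String :=
  match (pvL (pvWordsSetA tw)).find? (fun q => decide (pvMxv (pvL (pvWordsSetA tw)) ≤ q.1)) with
  | some q => if 2 ≤ pvMxv (pvL (pvWordsSetA tw)) then q.2 else pvFb tw
  | none => pvFb tw

theorem pvLe_mxv (l : List (Int × String)) (q : Int × String) (hq : q ∈ l) : q.1 ≤ pvMxv l := by
  induction l with
  | nil => simp at hq
  | cons p t ih =>
    simp only [pvMxv, List.foldr] at *
    rcases List.mem_cons.mp hq with h | h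
    · subst h; omega
    · have := ih h; omega

theorem pvMxv_attained (l : List (Int × String)) (h : 0 < pvMxv l) :
    ∃ q, l.find? (fun q => decide (pvMxv l ≤ q.1)) = some q := by
  induction l with
  | nil => simp [pvMxv] at h
  | cons p t ih =>
    by_cases hp : pvMxv (p :: t) ≤ p.1
    · exact ⟨p, by simp [List.find?, hp]⟩
    · have hm : pvMxv (p :: t) = pvMxv t := by
        simp only [pvMxv, List.foldr] at *; omega
      rw [hm] at h hp ⊢
      obtain ⟨q, hq⟩ := ih h
      exact ⟨q, by simp [List.find?, hp, hq]⟩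

theorem pvFoldA (l : List (Int × String)) (bm : Option String) (bo : Int) (h : 0 ≤ bo) :
    l.foldl pvStep (bm, bo) =
      if pvMxv l ≤ bo then (bm, bo)
      else match l.find? (fun q => decide (pvMxv l ≤ q.1)) with
           | some q => (some q.2, pvMxv l)
           | none => (bm, bo) := by
  induction l generalizing bm bo with
  | nil => simp [pvMxv]
  | cons p t ih =>
    have hm : pvMxv (p :: t) = max p.1 (pvMxv t) := rfl
    by_cases hbo : bo < p.1
    · have hstep : pvStep (bm, bo) p = (some p.2, p.1) := by simp [pvStep, hbo]
      rw [List.foldl_cons, hstep, ih _ _ (by omega)]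
      by_cases h2 : pvMxv t ≤ p.1
      · have : pvMxv (p :: t) = p.1 := by rw [hm]; omega
        rw [this]
        simp [List.find?, h2, show ¬ (p.1 ≤ bo) by omega]
      · have hmx : pvMxv (p :: t) = pvMxv t := by rw [hm]; omega
        rw [hmx]
        have hnb : ¬ (pvMxv t ≤ bo) := by omega
        have hnp : ¬ (pvMxv t ≤ p.1) := by omega
        obtain ⟨q, hq⟩ := pvMxv_attained t (by omega)
        simp [List.find?, h2, hnb, hq]
    · have hstep : pvStep (bm, bo) p = (bm, bo) := by simp [pvStep, hbo]
      rw [List.foldl_cons, hstep, ih _ _ h]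
      by_cases h3 : pvMxv t ≤ bo
      · have : pvMxv (p :: t) ≤ bo := by rw [hm]; omega
        simp [h3, this]
      · have hmx : pvMxv (p :: t) = pvMxv t := by rw [hm]; omega
        rw [hmx]
        have hnp : ¬ (pvMxv t ≤ p.1) := by omega
        simp [h3, List.find?, hnp]

theorem pvFind_eq (l : List (Int × String)) (m : Int) (h : ∀ q ∈ l, q.1 ≤ m) :
    l.find? (fun q => decide (m ≤ q.1)) = l.find? (fun q => q.1 == m) := by
  induction l with
  | nil => rfl
  | cons p t ih =>
    have hp := h p (List.mem_cons_self ..)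
    by_cases hm : m ≤ p.1
    · have : p.1 = m := by omega
      simp [List.find?, this]
    · have hne : ¬ (p.1 == m) = true := by simp; omega
      simp only [List.find?, decide_eq_false hm, hne]
      exact ih (fun q hq => h q (List.mem_cons_of_mem _ hq))

theorem pvIndexBind (l : List (Int × String)) (m : Int) :
    (PySem.List.index? (l.map (fun q => q.1)) m).bind (fun k => l[k]?) =
      l.find? (fun q => q.1 == m) := by
  induction l with
  | nil => rfl
  | cons p t ih =>
    by_cases hm : (p.1 == m) = true
    · have hm' : (m == p.1) = true := by simp at *; omega
      simp [PySem.List.index?_eq_idxOf?, List.idxOf?_cons, List.find?, hm]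
    · have hm' : (m == p.1) = false := by simp at *; omega
      simp only [List.map_cons, PySem.List.index?_eq_idxOf?, List.idxOf?_cons, List.find?,
        Bool.false_eq_true, if_false, hm]
      rw [← PySem.List.index?_eq_idxOf?, ← ih]
      cases PySem.List.index? (t.map (fun q => q.1)) m <;> simp

theorem pvFoldlMax (xs : List Int) (a : Int) (h : 0 ≤ a) :
    xs.foldl max a = max a (xs.foldr max 0) := by
  induction xs generalizing a with
  | nil => simp; omega
  | cons x t ih =>
    simp only [List.foldl_cons, List.foldr_cons]
    rw [ih _ (by omega)]
    omega

theorem pvLabels_ne (q : Int × String) (ws : List String) (hq : q ∈ pvL ws) : q.2 ≠ "" := by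
  rw [pvL] at hq
  obtain ⟨p, hp, rfl⟩ := List.mem_map.mp hq
  have hB : ∀ p ∈ pvPats, p.2 ≠ "" := by decide
  exact hB p hp

theorem pvOverlap (ws kws : List String) (h : kws.Nodup) :
    PySem.Set.len (PySem.Set.inter ws (PySem.Set.ofList kws)) =
      ((ws.countP (fun w => decide (w ∈ kws)) : Nat) : Int) := by
  rw [PySem.Set.ofList_eq_self_of_nodup _ h]
  simp [PySem.Set.len, PySem.Set.inter, List.countP_eq_length_filter]

theorem pvMapA (ws : List String) :
    pvPatternsA.map (fun p => (PySem.Set.len (PySem.Set.inter ws p.1), p.2)) = pvL ws := by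
  simp only [pvPatternsA, pvPats, pvL, List.map,
    pvOverlap ws ["noise", "loud", "sound", "quiet", "residential", "neighborhood", "quality life"] (by decide),
    pvOverlap ws ["water", "drought", "consumption", "gallons", "aquifer", "shortage", "cooling"] (by decide),
    pvOverlap ws ["power", "grid", "electricity", "energy", "outage", "brownout", "blackout", "strain"] (by decide),
    pvOverlap ws ["property", "home", "value", "housing", "land", "zoning", "residential", "real estate"] (by decide),
    pvOverlap ws ["tax", "incentive", "subsidy", "break", "revenue", "taxpayer", "abatement", "deal"] (by decide),
    pvOverlap ws ["environment", "climate", "carbon", "emissions", "pollution", "green", "sustainable"] (by decide),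
    pvOverlap ws ["jobs", "employment", "hire", "workers", "economic", "economy", "workforce"] (by decide),
    pvOverlap ws ["traffic", "construction", "road", "truck", "congestion", "infrastructure"] (by decide),
    pvOv]

theorem pvBest_eq (ws : List String) :
    pvBest ws = (pvL ws).foldl pvStep ((none : Option String), (0 : Int)) := by
  rw [pvBest, ← pvMapA ws, List.foldl_map]
  rfl

theorem pvA_eq (tw : List String) : auto_label_topic_py tw = pvRef tw := by
  unfold auto_label_topic_py pvRef
  rw [pvBest_eq, pvFoldA _ none 0 (le_refl 0)]
  by_cases hm : pvMxv (pvL (pvWordsSetA tw)) ≤ 0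
  · simp only [hm, if_true]
    cases hf : (pvL (pvWordsSetA tw)).find? (fun q => decide (pvMxv (pvL (pvWordsSetA tw)) ≤ q.1)) with
    | none => simp [pvFb]
    | some q => simp [pvFb, show ¬ ((2:Int) ≤ pvMxv (pvL (pvWordsSetA tw))) by omega]
  · simp only [hm, if_false]
    obtain ⟨q, hq⟩ := pvMxv_attained (pvL (pvWordsSetA tw)) (by omega)
    rw [hq]
    have hne := pvLabels_ne q _ (List.mem_of_find?_eq_some hq)
    by_cases h2' : (2:Int) ≤ pvMxv (pvL (pvWordsSetA tw)) <;> simp [h2', hne, pvFb]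

-- ---- B-side: the voting fold computes the per-pattern overlap counts ----

set_option maxRecDepth 8192 in
theorem pvDictFacts :
    pvIndex.keys.Nodup ∧ ∀ e ∈ pvIndex.items, e.2.Nodup ∧ ∀ i ∈ e.2, 0 ≤ i ∧ i < 8 := by
  decide

theorem pvMemGetD_iff (d : PySem.Dict String (List Int)) (hnd : d.keys.Nodup) (w : String) (j : Int) :
    j ∈ PySem.Dict.getD d w [] ↔ w ∈ ((d.items.filter (fun e => decide (j ∈ e.2))).map (fun e => e.1)) := by
  constructor
  · intro hj
    cases hq : d.get? w with
    | none => rw [PySem.Dict.getD_of_get?_eq_none _ _ hq] at hj; simp at hj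
    | some v =>
      rw [PySem.Dict.getD_of_get?_eq_some _ _ hq] at hj
      have hmem := PySem.Dict.mem_items_of_get?_eq_some _ hq
      exact List.mem_map.mpr ⟨(w, v), List.mem_filter.mpr ⟨hmem, by simpa using hj⟩, rfl⟩
  · intro hw
    obtain ⟨e, he, rfl⟩ := List.mem_map.mp hw
    have hef := List.mem_filter.mp he
    have : PySem.Dict.getD d e.1 [] = e.2 :=
      PySem.Dict.getD_of_mem_items d (by exact hef.1) hnd []
    rw [this]
    simpa using hef.2

theorem pvGetD_bounds (w : String) : ∀ i ∈ PySem.Dict.getD pvIndex w [], 0 ≤ i ∧ i < 8 := by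
  intro i hi
  cases hq : pvIndex.get? w with
  | none => rw [PySem.Dict.getD_of_get?_eq_none _ _ hq] at hi; simp at hi
  | some v =>
    rw [PySem.Dict.getD_of_get?_eq_some _ _ hq] at hi
    exact (pvDictFacts.2 _ (PySem.Dict.mem_items_of_get?_eq_some _ hq)).2 i hi

theorem pvGetD_nodup (w : String) : (PySem.Dict.getD pvIndex w []).Nodup := by
  cases hq : pvIndex.get? w with
  | none => rw [PySem.Dict.getD_of_get?_eq_none _ _ hq]; simp
  | some v =>
    rw [PySem.Dict.getD_of_get?_eq_some _ _ hq]
    exact (pvDictFacts.2 _ (PySem.Dict.mem_items_of_get?_eq_some _ hq)).1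

-- j ∈ index[w] ↔ w is a keyword of pattern j (the dict's entries, filtered by j, are pattern j's keywords)
set_option maxRecDepth 8192 in
theorem pvMemIdx0 (w : String) : ((0:Int) ∈ PySem.Dict.getD pvIndex w []) ↔
    w ∈ ["noise", "loud", "sound", "quiet", "residential", "neighborhood", "quality life"] := by
  rw [pvMemGetD_iff pvIndex pvDictFacts.1 w 0,
    show ((pvIndex.items.filter (fun e => decide ((0:Int) ∈ e.2))).map (fun e => e.1))
      = ["noise", "loud", "sound", "quiet", "residential", "neighborhood", "quality life"] from by decide]

set_option maxRecDepth 8192 in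
theorem pvMemIdx1 (w : String) : ((1:Int) ∈ PySem.Dict.getD pvIndex w []) ↔
    w ∈ ["water", "drought", "consumption", "gallons", "aquifer", "shortage", "cooling"] := by
  rw [pvMemGetD_iff pvIndex pvDictFacts.1 w 1,
    show ((pvIndex.items.filter (fun e => decide ((1:Int) ∈ e.2))).map (fun e => e.1))
      = ["water", "drought", "consumption", "gallons", "aquifer", "shortage", "cooling"] from by decide]

set_option maxRecDepth 8192 in
theorem pvMemIdx2 (w : String) : ((2:Int) ∈ PySem.Dict.getD pvIndex w []) ↔
    w ∈ ["power", "grid", "electricity", "energy", "outage", "brownout", "blackout", "strain"] := by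
  rw [pvMemGetD_iff pvIndex pvDictFacts.1 w 2,
    show ((pvIndex.items.filter (fun e => decide ((2:Int) ∈ e.2))).map (fun e => e.1))
      = ["power", "grid", "electricity", "energy", "outage", "brownout", "blackout", "strain"] from by decide]

-- pattern 3: the dict lists "residential" first (it also belongs to pattern 0)
set_option maxRecDepth 8192 in
theorem pvMemIdx3 (w : String) : ((3:Int) ∈ PySem.Dict.getD pvIndex w []) ↔
    w ∈ ["property", "home", "value", "housing", "land", "zoning", "residential", "real estate"] := by
  rw [pvMemGetD_iff pvIndex pvDictFacts.1 w 3,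
    show ((pvIndex.items.filter (fun e => decide ((3:Int) ∈ e.2))).map (fun e => e.1))
      = ["residential", "property", "home", "value", "housing", "land", "zoning", "real estate"] from by decide]
  simp only [List.mem_cons, List.not_mem_nil]
  tauto

set_option maxRecDepth 8192 in
theorem pvMemIdx4 (w : String) : ((4:Int) ∈ PySem.Dict.getD pvIndex w []) ↔
    w ∈ ["tax", "incentive", "subsidy", "break", "revenue", "taxpayer", "abatement", "deal"] := by
  rw [pvMemGetD_iff pvIndex pvDictFacts.1 w 4,
    show ((pvIndex.items.filter (fun e => decide ((4:Int) ∈ e.2))).map (fun e => e.1))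
      = ["tax", "incentive", "subsidy", "break", "revenue", "taxpayer", "abatement", "deal"] from by decide]

set_option maxRecDepth 8192 in
theorem pvMemIdx5 (w : String) : ((5:Int) ∈ PySem.Dict.getD pvIndex w []) ↔
    w ∈ ["environment", "climate", "carbon", "emissions", "pollution", "green", "sustainable"] := by
  rw [pvMemGetD_iff pvIndex pvDictFacts.1 w 5,
    show ((pvIndex.items.filter (fun e => decide ((5:Int) ∈ e.2))).map (fun e => e.1))
      = ["environment", "climate", "carbon", "emissions", "pollution", "green", "sustainable"] from by decide]

set_option maxRecDepth 8192 in
theorem pvMemIdx6 (w : String) : ((6:Int) ∈ PySem.Dict.getD pvIndex w []) ↔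
    w ∈ ["jobs", "employment", "hire", "workers", "economic", "economy", "workforce"] := by
  rw [pvMemGetD_iff pvIndex pvDictFacts.1 w 6,
    show ((pvIndex.items.filter (fun e => decide ((6:Int) ∈ e.2))).map (fun e => e.1))
      = ["jobs", "employment", "hire", "workers", "economic", "economy", "workforce"] from by decide]

set_option maxRecDepth 8192 in
theorem pvMemIdx7 (w : String) : ((7:Int) ∈ PySem.Dict.getD pvIndex w []) ↔
    w ∈ ["traffic", "construction", "road", "truck", "congestion", "infrastructure"] := by
  rw [pvMemGetD_iff pvIndex pvDictFacts.1 w 7,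
    show ((pvIndex.items.filter (fun e => decide ((7:Int) ∈ e.2))).map (fun e => e.1))
      = ["traffic", "construction", "road", "truck", "congestion", "infrastructure"] from by decide]

theorem pvIncr_eval (cs : List Int) (i : Int) (h0 : 0 ≤ i) (h8 : i < (cs.length : Int)) :
    pvIncr cs i = cs.set i.toNat (cs[i.toNat]'(by omega) + 1) := by
  rw [pvIncr, PySem.List.pySetD_of_nonneg _ _ h0, PySem.List.pyGetD_eq_getElem _ _ h0 h8]

theorem pvFold8 (l : List Int) (hb : ∀ i ∈ l, 0 ≤ i ∧ i < 8) (c0 c1 c2 c3 c4 c5 c6 c7 : Int) :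
    l.foldl pvIncr [c0, c1, c2, c3, c4, c5, c6, c7] =
      [c0 + (l.count 0 : Nat), c1 + (l.count 1 : Nat), c2 + (l.count 2 : Nat), c3 + (l.count 3 : Nat),
       c4 + (l.count 4 : Nat), c5 + (l.count 5 : Nat), c6 + (l.count 6 : Nat), c7 + (l.count 7 : Nat)] := by
  induction l generalizing c0 c1 c2 c3 c4 c5 c6 c7 with
  | nil => simp
  | cons i t ih =>
    obtain ⟨h0, h8⟩ := hb i (List.mem_cons_self ..)
    have htb := fun i hi => hb i (List.mem_cons_of_mem _ hi)
    rw [List.foldl_cons, pvIncr_eval _ i h0 (by simpa using h8)]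
    interval_cases i <;>
      · norm_num [List.set, Int.toNat]
        rw [ih htb]
        simp
        all_goals omega

set_option maxRecDepth 8192 in
theorem pvVotes (ws : List String) (c0 c1 c2 c3 c4 c5 c6 c7 : Int) :
    ws.foldl pvVote [c0, c1, c2, c3, c4, c5, c6, c7] =
      [c0 + (ws.countP (fun w => decide ((0:Int) ∈ PySem.Dict.getD pvIndex w [])) : Nat),
       c1 + (ws.countP (fun w => decide ((1:Int) ∈ PySem.Dict.getD pvIndex w [])) : Nat),
       c2 + (ws.countP (fun w => decide ((2:Int) ∈ PySem.Dict.getD pvIndex w [])) : Nat),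
       c3 + (ws.countP (fun w => decide ((3:Int) ∈ PySem.Dict.getD pvIndex w [])) : Nat),
       c4 + (ws.countP (fun w => decide ((4:Int) ∈ PySem.Dict.getD pvIndex w [])) : Nat),
       c5 + (ws.countP (fun w => decide ((5:Int) ∈ PySem.Dict.getD pvIndex w [])) : Nat),
       c6 + (ws.countP (fun w => decide ((6:Int) ∈ PySem.Dict.getD pvIndex w [])) : Nat),
       c7 + (ws.countP (fun w => decide ((7:Int) ∈ PySem.Dict.getD pvIndex w [])) : Nat)] := by
  induction ws generalizing c0 c1 c2 c3 c4 c5 c6 c7 with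
  | nil => simp
  | cons w t ih =>
    have hcnt : ∀ j : Int, ((PySem.Dict.getD pvIndex w []).count j : Nat)
        = if j ∈ PySem.Dict.getD pvIndex w [] then 1 else 0 := by
      intro j
      by_cases hj : j ∈ PySem.Dict.getD pvIndex w []
      · simp [hj, List.count_eq_one_of_mem (pvGetD_nodup w) hj]
      · simp [hj, List.count_eq_zero_of_not_mem hj]
    rw [List.foldl_cons, show pvVote [c0, c1, c2, c3, c4, c5, c6, c7] w
        = (PySem.Dict.getD pvIndex w []).foldl pvIncr [c0, c1, c2, c3, c4, c5, c6, c7] from rfl,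
      pvFold8 _ (pvGetD_bounds w) c0 c1 c2 c3 c4 c5 c6 c7, ih]
    simp only [List.countP_cons, hcnt, decide_eq_true_eq, List.cons.injEq]
    and_intros <;> first
      | trivial
      | (split_ifs <;> push_cast <;> omega)

set_option maxRecDepth 8192 in
theorem pvCounts_eq (tw : List String) :
    pvCountsB tw = (pvL (pvWordsSetA tw)).map (fun q => q.1) := by
  rw [pvCountsB, show List.replicate pvLabels.length (0:Int) = [0,0,0,0,0,0,0,0] from rfl,
    show PySem.Set.ofList (tw.map PySem.Str.lower) = pvWordsSetA tw from rfl,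
    pvVotes]
  have e0 : (fun w => decide ((0:Int) ∈ PySem.Dict.getD pvIndex w []))
      = fun w => decide (w ∈ ["noise", "loud", "sound", "quiet", "residential", "neighborhood", "quality life"]) := by
    funext w; simp only [pvMemIdx0 w]
  have e1 : (fun w => decide ((1:Int) ∈ PySem.Dict.getD pvIndex w []))
      = fun w => decide (w ∈ ["water", "drought", "consumption", "gallons", "aquifer", "shortage", "cooling"]) := by
    funext w; simp only [pvMemIdx1 w]
  have e2 : (fun w => decide ((2:Int) ∈ PySem.Dict.getD pvIndex w []))
      = fun w => decide (w ∈ ["power", "grid", "electricity", "energy", "outage", "brownout", "blackout", "strain"]) := by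
    funext w; simp only [pvMemIdx2 w]
  have e3 : (fun w => decide ((3:Int) ∈ PySem.Dict.getD pvIndex w []))
      = fun w => decide (w ∈ ["property", "home", "value", "housing", "land", "zoning", "residential", "real estate"]) := by
    funext w; simp only [pvMemIdx3 w]
  have e4 : (fun w => decide ((4:Int) ∈ PySem.Dict.getD pvIndex w []))
      = fun w => decide (w ∈ ["tax", "incentive", "subsidy", "break", "revenue", "taxpayer", "abatement", "deal"]) := by
    funext w; simp only [pvMemIdx4 w]
  have e5 : (fun w => decide ((5:Int) ∈ PySem.Dict.getD pvIndex w []))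
      = fun w => decide (w ∈ ["environment", "climate", "carbon", "emissions", "pollution", "green", "sustainable"]) := by
    funext w; simp only [pvMemIdx5 w]
  have e6 : (fun w => decide ((6:Int) ∈ PySem.Dict.getD pvIndex w []))
      = fun w => decide (w ∈ ["jobs", "employment", "hire", "workers", "economic", "economy", "workforce"]) := by
    funext w; simp only [pvMemIdx6 w]
  have e7 : (fun w => decide ((7:Int) ∈ PySem.Dict.getD pvIndex w []))
      = fun w => decide (w ∈ ["traffic", "construction", "road", "truck", "congestion", "infrastructure"]) := by
    funext w; simp only [pvMemIdx7 w]
  rw [e0, e1, e2, e3, e4, e5, e6, e7]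
  simp [pvL, pvPats, pvOv]

theorem pvMax_eq (ws : List String) :
    PySem.List.max? ((pvL ws).map (fun q => q.1)) (fun c => c) = some (pvMxv (pvL ws)) := by
  simp only [pvL, pvPats, List.map]
  rw [PySem.List.max?_id_cons]
  rw [pvFoldlMax _ _ (by simp [pvOv])]
  simp only [pvMxv, List.foldr]

theorem pvB_eq (tw : List String) : auto_label_topic_py_alt tw = pvRef tw := by
  unfold auto_label_topic_py_alt pvRef
  rw [pvCounts_eq, pvMax_eq]
  by_cases h2 : (2:Int) ≤ pvMxv (pvL (pvWordsSetA tw))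
  · simp only [h2, if_true]
    have hfind : (pvL (pvWordsSetA tw)).find? (fun q => decide (pvMxv (pvL (pvWordsSetA tw)) ≤ q.1))
        = (pvL (pvWordsSetA tw)).find? (fun q => q.1 == pvMxv (pvL (pvWordsSetA tw))) :=
      pvFind_eq _ _ (fun q hq => pvLe_mxv _ q hq)
    obtain ⟨q, hq⟩ := pvMxv_attained (pvL (pvWordsSetA tw)) (by omega)
    rw [hfind] at hq
    have hbind := pvIndexBind (pvL (pvWordsSetA tw)) (pvMxv (pvL (pvWordsSetA tw)))
    rw [hq] at hbind
    rw [hfind, hq]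
    cases hidx : PySem.List.index? ((pvL (pvWordsSetA tw)).map (fun q => q.1)) (pvMxv (pvL (pvWordsSetA tw))) with
    | none => rw [hidx] at hbind; simp at hbind
    | some k =>
      rw [hidx] at hbind
      simp only [Option.bind_some] at hbind
      have hk : (pvL (pvWordsSetA tw))[k]? = (pvPats[k]?).map (fun p => (pvOv (pvWordsSetA tw) p.1, p.2)) := by
        simp [pvL]
      rw [hk] at hbind
      have hlab : pvLabels[k]? = (pvPats[k]?).map (fun p => p.2) := by
        rw [show pvLabels = pvPats.map (fun p => p.2) from rfl]
        simp
      cases hp : pvPats[k]? with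
      | none => rw [hp] at hbind; simp at hbind
      | some p =>
        rw [hp] at hbind
        simp only [Option.map_some, Option.some.injEq] at hbind
        simp [hlab, hp, ← hbind]
  · simp only [h2, if_false]
    cases hf : (pvL (pvWordsSetA tw)).find? (fun q => decide (pvMxv (pvL (pvWordsSetA tw)) ≤ q.1)) with
    | none => simp [pvFb]
    | some q => simp [pvFb]

theorem pvMain (tw : List String) (_ : tw ≠ []) :
    auto_label_topic_py tw = auto_label_topic_py_alt tw := by
  rw [pvA_eq, pvB_eq]

-- ===== VERDICT (by name: the statement is the Claim_ definition above) =====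
theorem auto_label_topic_py_spec : Claim_equal_auto_label_topic_py := by
  intro tw _ hpre
  unfold Spec_auto_label_topic_py
  exact pvMain tw hpre
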